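-- pv_equiv track=rewrite | github.com/jaimemartinagui/dummy-calculator | main.py | _substract_values
-- ===== SOURCE A (Python) =====
-- def _substract_values(values):
--     """Method to substract the second value in values from the first one."""
--
--     result = [1 for _ in range(values[0])]
--     if_negative_result = []
--     for _ in range(values[1]):
--         try:
--             result.pop()
--         except IndexError:
--             if_negative_result.append(1)
--
--     return -len(if_negative_result) if if_negative_result else len(result)
-- ===== SOURCE B (Python) =====
-- def _substract_values(values):
--     """Subtract the second value from the first, each clamped at zero."""
--     return max(values[0], 0) - max(values[1], 0)
-- ===== Notes on version B (the rewrite author's own statement) =====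
-- stated objective: faster
-- what changed: B replaces A's O(v0+v1) token-list pop/append simulation with the O(1) closed form max(values[0],0) - max(values[1],0).
import Mathlib
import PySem

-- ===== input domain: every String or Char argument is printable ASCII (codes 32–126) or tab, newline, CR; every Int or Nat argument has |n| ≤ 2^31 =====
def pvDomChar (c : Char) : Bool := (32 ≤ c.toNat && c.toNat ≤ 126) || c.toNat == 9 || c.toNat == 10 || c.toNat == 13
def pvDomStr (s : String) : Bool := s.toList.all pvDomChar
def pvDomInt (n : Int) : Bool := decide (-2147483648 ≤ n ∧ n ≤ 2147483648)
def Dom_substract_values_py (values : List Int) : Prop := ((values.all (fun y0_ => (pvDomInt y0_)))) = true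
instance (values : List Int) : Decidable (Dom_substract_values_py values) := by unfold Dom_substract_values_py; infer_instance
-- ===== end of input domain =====

-- B computes the closed form max(values[0],0) - max(values[1],0) instead of A's token-list pop/append simulation.

-- ===== PORT A =====
-- one loop iteration: try result.pop() except IndexError: if_negative_result.append(1)
def pvPopStep (s : List Int × List Int) (_ : Int) : List Int × List Int :=
  match PySem.List.pop? s.1 (-1) with
  | some (_, rest) => (rest, s.2)
  | none => (s.1, s.2 ++ [1])

def substract_values_py (values : List Int) : Int :=
  let result := (PySem.List.pyRange 0 (PySem.List.pyGetD values 0 0) 1).map (fun _ => (1 : Int))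
  let s := (PySem.List.pyRange 0 (PySem.List.pyGetD values 1 0) 1).foldl pvPopStep (result, [])
  if s.2 ≠ [] then -(s.2.length : Int) else (s.1.length : Int)

-- ===== PORT B =====
def substract_values_py_alt (values : List Int) : Int :=
  max (PySem.List.pyGetD values 0 0) 0 - max (PySem.List.pyGetD values 1 0) 0

-- ===== PRECONDITION & SPEC =====
-- A (and B) raise IndexError when values has fewer than two elements; exactly those inputs are excluded.
def Pre_substract_values_py (values : List Int) : Prop := 2 ≤ values.length
instance (values : List Int) : Decidable (Pre_substract_values_py values) := by unfold Pre_substract_values_py; infer_instance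
def pvWitness_substract_values_py : List Int := ([5, 3])

def Spec_substract_values_py (values : List Int) (out : Int) : Prop := out = substract_values_py_alt values
instance (values : List Int) (out : Int) : Decidable (Spec_substract_values_py values out) := by unfold Spec_substract_values_py; infer_instance

-- ===== CLAIM (what is proved, stated in full; the proofs are below) =====
def Claim_equal_substract_values_py : Prop := ∀ (values : List Int), Dom_substract_values_py values → Pre_substract_values_py values → Spec_substract_values_py values (substract_values_py values)

-- ===== LEMMAS AND PROOFS =====

theorem pvPopStep_replicate (l : List Int) : ∀ (a c : Nat), (0 < c → a = 0) →
    l.foldl pvPopStep (List.replicate a 1, List.replicate c 1)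
      = (List.replicate (a - l.length) 1, List.replicate (c + (l.length - a)) 1) := by
  induction l with
  | nil => intro a c _; simp
  | cons x t ih =>
    intro a c hc
    cases a with
    | zero =>
      have h1 : pvPopStep (List.replicate 0 (1:Int), List.replicate c 1) x
          = (List.replicate 0 1, List.replicate (c+1) 1) := by
        simp [pvPopStep, PySem.List.pop?, List.replicate_succ' (n := c)]
      simp only [List.foldl_cons, h1]
      rw [ih 0 (c+1) (by omega)]
      congr 1 <;> simp <;> omega
    | succ n =>
      have hc0 : c = 0 := by by_cases h : 0 < c; · omega
                             · omega
      subst hc0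
      have h1 : pvPopStep (List.replicate (n+1) (1:Int), (List.replicate 0 1 : List Int)) x
          = (List.replicate n 1, List.replicate 0 1) := by
        simp [pvPopStep, PySem.List.pop?, List.replicate_succ' (n := n), PySem.List.pyIdx?,
              List.eraseIdx_append_of_length_le]
      simp only [List.foldl_cons, h1]
      rw [ih n 0 (by omega)]
      simp [Nat.succ_sub_succ]

theorem map_const_pyRange (n : Int) :
    (PySem.List.pyRange 0 n 1).map (fun _ => (1 : Int)) = List.replicate n.toNat 1 := by
  rw [List.eq_replicate_iff]
  constructor
  · simp [PySem.List.length_pyRange_one]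
  · intro b hb; simp at hb; omega

-- ===== VERDICT (by name: the statement is the Claim_ definition above) =====
theorem substract_values_py_spec : Claim_equal_substract_values_py := by
  intro values _ _
  unfold Spec_substract_values_py substract_values_py substract_values_py_alt
  set v0 := PySem.List.pyGetD values 0 0 with hv0
  set v1 := PySem.List.pyGetD values 1 0 with hv1
  simp only [map_const_pyRange]
  have hlen : (PySem.List.pyRange 0 v1 1).length = v1.toNat := by
    simpa using PySem.List.length_pyRange_one 0 v1
  have := pvPopStep_replicate (PySem.List.pyRange 0 v1 1) v0.toNat 0 (by omega)
  rw [show (List.replicate 0 (1:Int)) = ([] : List Int) from rfl] at this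
  rw [this, hlen]
  by_cases h : v1.toNat - v0.toNat = 0
  · simp [h]; omega
  · have : List.replicate (0 + (v1.toNat - v0.toNat)) (1:Int) ≠ [] := by
      simp; omega
    simp only [this, if_pos, ne_eq, not_true_eq_false, if_true]
    simp; omega
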